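-- pv_equiv track=rewrite | github.com/cuebook/cuelake | api/genie/services/metastore.py | __convertTablesToTreeStructure
-- ===== SOURCE A (Python) =====
-- from typing import List
--
-- def __convertTablesToTreeStructure(tables: List):
--     treeStructure = {}
--     for table in tables:
--         if table["database"] not in treeStructure:
--             treeStructure[table["database"]] = {"views": [], "tables": []}
--         if table["type"] == "VIRTUAL_VIEW":
--             treeStructure[table["database"]]["views"].append(table)
--         else:
--             treeStructure[table["database"]]["tables"].append(table)
--     return treeStructure
-- ===== SOURCE B (Python) =====
-- def __convertTablesToTreeStructure(tables):
--     # Group-first, partition-second: one grouping pass, then build each entry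
--     # by filtering the group's list into views and tables.
--     grouped = {}
--     for table in tables:
--         grouped.setdefault(table["database"], []).append(table)
--     result = {}
--     for database, items in grouped.items():
--         result[database] = {
--             "views": [t for t in items if t["type"] == "VIRTUAL_VIEW"],
--             "tables": [t for t in items if not (t["type"] == "VIRTUAL_VIEW")],
--         }
--     return result
-- ===== Notes on version B (the rewrite author's own statement) =====
-- stated objective: alternative
-- what changed: Replaces A's single interleaved pass (create-entry-then-append into the right bucket per table) by a group-first pass building database -> list-of-tables, followed by a second pass that partitions each group into views/tables by filtering.
import Mathlib
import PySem

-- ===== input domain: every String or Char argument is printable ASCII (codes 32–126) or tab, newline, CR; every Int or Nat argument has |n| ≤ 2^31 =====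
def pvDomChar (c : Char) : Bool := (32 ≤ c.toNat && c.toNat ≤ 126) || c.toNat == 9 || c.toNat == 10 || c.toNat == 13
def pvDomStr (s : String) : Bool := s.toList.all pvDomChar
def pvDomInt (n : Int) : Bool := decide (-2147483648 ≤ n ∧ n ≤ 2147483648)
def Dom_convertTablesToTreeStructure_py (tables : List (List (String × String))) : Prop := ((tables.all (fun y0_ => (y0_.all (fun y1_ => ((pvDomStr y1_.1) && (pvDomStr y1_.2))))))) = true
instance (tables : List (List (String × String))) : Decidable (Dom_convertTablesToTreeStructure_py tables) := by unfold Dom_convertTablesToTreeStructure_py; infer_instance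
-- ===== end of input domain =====

-- B replaces A's single interleaved pass by a group-by-database pass followed by a
-- partition-into-views/tables pass over each group (alternative decomposition, same cost).


-- ===== PORT A =====
-- port of `table[k]` for a string-valued table dict; Pre_ guarantees the key is
-- present (Python raises KeyError otherwise), so the "" default is never the value used.
def pvTblGet (t : List (String × String)) (k : String) : String :=
  ((PySem.Dict.mk t).get? k).getD ""

-- port of `table["type"] == "VIRTUAL_VIEW"` (used verbatim by both Pythons)
def pvIsView (t : List (String × String)) : Bool :=
  pvTblGet t "type" == "VIRTUAL_VIEW"

-- one iteration of A's loop body (create the entry if absent, then append into the bucket;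
-- `treeStructure[db][bucket].append(t)` is `modify` at db / at the bucket key)
def pvStepA (d : PySem.Dict String (PySem.Dict String (List (List (String × String)))))
    (t : List (String × String)) :
    PySem.Dict String (PySem.Dict String (List (List (String × String)))) :=
  let db := pvTblGet t "database"
  let d1 := if d.contains db then d
            else d.insert db (PySem.Dict.mk [("views", []), ("tables", [])])
  if pvIsView t then
    d1.modify db (PySem.Dict.mk []) (fun inner => inner.modify "views" [] (· ++ [t]))
  else
    d1.modify db (PySem.Dict.mk []) (fun inner => inner.modify "tables" [] (· ++ [t]))

def convertTablesToTreeStructure_py (tables : List (List (String × String))) :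
    List (String × List (String × List (List (String × String)))) :=
  ((tables.foldl pvStepA PySem.Dict.empty).items).map (fun p => (p.1, p.2.items))

-- ===== PORT B =====
-- one iteration of B's grouping loop: grouped.setdefault(db, []).append(t)
def pvStepB (g : PySem.Dict String (List (List (String × String))))
    (t : List (String × String)) : PySem.Dict String (List (List (String × String))) :=
  g.modify (pvTblGet t "database") [] (· ++ [t])

def convertTablesToTreeStructure_py_alt (tables : List (List (String × String))) :
    List (String × List (String × List (List (String × String)))) :=
  ((tables.foldl pvStepB PySem.Dict.empty).items).map (fun p =>
    (p.1, [("views", p.2.filter (fun t => pvIsView t)),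
           ("tables", p.2.filter (fun t => !pvIsView t))]))

-- ===== PRECONDITION & SPEC =====
-- Pre_ excludes exactly the tables missing the "database" or "type" key, on which
-- Python A (and B) raises KeyError.
def Pre_convertTablesToTreeStructure_py (tables : List (List (String × String))) : Prop :=
  (tables.all (fun t => (PySem.Dict.mk t).contains "database" && (PySem.Dict.mk t).contains "type")) = true
instance (tables : List (List (String × String))) : Decidable (Pre_convertTablesToTreeStructure_py tables) := by unfold Pre_convertTablesToTreeStructure_py; infer_instance
def pvWitness_convertTablesToTreeStructure_py : (List (List (String × String))) :=
  ([[("database", "db1"), ("type", "VIRTUAL_VIEW"), ("name", "v1")],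
    [("database", "db1"), ("type", "MANAGED"), ("name", "t1")]])

-- instance synthesis exceeds the default search size at this nesting depth; assemble it explicitly
def pvDecEqOut : DecidableEq (List (String × List (String × List (List (String × String))))) :=
  @instDecidableEqList _ (@instDecidableEqProd _ _ _
    (@instDecidableEqList _ (@instDecidableEqProd _ _ _
      (@instDecidableEqList _ (@instDecidableEqList _ (inferInstance : DecidableEq (String × String)))))))

def Spec_convertTablesToTreeStructure_py (tables : List (List (String × String))) (out : List (String × List (String × List (List (String × String))))) : Prop := out = convertTablesToTreeStructure_py_alt tables
instance (tables : List (List (String × String))) (out : List (String × List (String × List (List (String × String))))) : Decidable (Spec_convertTablesToTreeStructure_py tables out) := by unfold Spec_convertTablesToTreeStructure_py; exact pvDecEqOut _ _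

-- ===== CLAIM (what is proved, stated in full; the proofs are below) =====
def Claim_equal_convertTablesToTreeStructure_py : Prop := ∀ (tables : List (List (String × String))), Dom_convertTablesToTreeStructure_py tables → Pre_convertTablesToTreeStructure_py tables → Spec_convertTablesToTreeStructure_py tables (convertTablesToTreeStructure_py tables)

-- ===== LEMMAS AND PROOFS =====

-- the inner {"views": …, "tables": …} dict that A maintains for a group with members l
def pvMkInner (l : List (List (String × String))) :
    PySem.Dict String (List (List (String × String))) :=
  PySem.Dict.mk [("views", l.filter pvIsView), ("tables", l.filter (fun t => !pvIsView t))]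

def pvRender (p : String × List (List (String × String))) :
    String × PySem.Dict String (List (List (String × String))) :=
  (p.1, pvMkInner p.2)

theorem pvModify_mkInner_views (old : List (List (String × String)))
    (t : List (String × String)) (h : pvIsView t = true) :
    (pvMkInner old).insert "views" ((pvMkInner old).getD "views" [] ++ [t])
      = pvMkInner (old ++ [t]) := by
  simp [h, pvMkInner, PySem.Dict.insert, PySem.Dict.contains,
    PySem.Dict.getD, PySem.Dict.get?, List.filter_append]

theorem pvModify_mkInner_tables (old : List (List (String × String)))
    (t : List (String × String)) (h : pvIsView t = false) :
    (pvMkInner old).insert "tables" ((pvMkInner old).getD "tables" [] ++ [t])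
      = pvMkInner (old ++ [t]) := by
  simp [h, pvMkInner, PySem.Dict.insert, PySem.Dict.contains,
    PySem.Dict.getD, PySem.Dict.get?, List.filter_append]

theorem pvStepA_render (L : List (String × List (List (String × String))))
    (t : List (String × String)) :
    pvStepA (PySem.Dict.mk (L.map pvRender)) t
      = PySem.Dict.mk ((pvStepB (PySem.Dict.mk L) t).items.map pvRender) := by
  have hc : (PySem.Dict.mk (L.map pvRender)).contains (pvTblGet t "database")
      = (PySem.Dict.mk L).contains (pvTblGet t "database") := by
    simp [PySem.Dict.contains, List.any_map, pvRender, Function.comp_def]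
  have hget : (PySem.Dict.mk (L.map pvRender)).get? (pvTblGet t "database")
      = ((PySem.Dict.mk L).get? (pvTblGet t "database")).map pvMkInner := by
    simp [PySem.Dict.get?, List.find?_map, pvRender, Function.comp_def, Option.map_map]
  by_cases h : (PySem.Dict.mk L).contains (pvTblGet t "database") = true
  · obtain ⟨old, hold⟩ : ∃ old, (PySem.Dict.mk L).get? (pvTblGet t "database") = some old := by
      rw [← Option.isSome_iff_exists, ← PySem.Dict.contains_eq_isSome_get?]; exact h
    have hgetD : (PySem.Dict.mk (L.map pvRender)).getD (pvTblGet t "database") (PySem.Dict.mk [])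
        = pvMkInner old := by
      simp [PySem.Dict.getD, hget, hold]
    have hA : pvStepA (PySem.Dict.mk (L.map pvRender)) t
        = (PySem.Dict.mk (L.map pvRender)).insert (pvTblGet t "database")
            (pvMkInner (old ++ [t])) := by
      by_cases hv : pvIsView t = true
      · simp only [pvStepA, hc, h, if_true, hv, PySem.Dict.modify, hgetD]
        rw [pvModify_mkInner_views old t hv]
      · simp only [pvStepA, hc, h, if_true, hv, if_false, Bool.false_eq_true,
          PySem.Dict.modify, hgetD]
        rw [pvModify_mkInner_tables old t (Bool.eq_false_iff.mpr hv)]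
    have hB : pvStepB (PySem.Dict.mk L) t
        = (PySem.Dict.mk L).insert (pvTblGet t "database") (old ++ [t]) := by
      simp [pvStepB, PySem.Dict.modify, PySem.Dict.getD, hold]
    rw [hA, hB]
    apply PySem.Dict.ext
    rw [PySem.Dict.items_insert_of_contains _ _ (hc.trans h),
      PySem.Dict.items_insert_of_contains _ _ h]
    simp only [List.map_map]
    refine List.map_congr_left (fun p _ => ?_)
    by_cases hp : p.1 = pvTblGet t "database" <;> simp [pvRender, hp]
  · have hA : pvStepA (PySem.Dict.mk (L.map pvRender)) t
        = (PySem.Dict.mk (L.map pvRender)).insert (pvTblGet t "database") (pvMkInner [t]) := by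
      have h0 : (PySem.Dict.mk [("views", []), ("tables", [])] :
          PySem.Dict String (List (List (String × String)))) = pvMkInner [] := rfl
      by_cases hv : pvIsView t = true
      · simp only [pvStepA, hc, h, if_false, Bool.false_eq_true, hv, if_true,
          PySem.Dict.modify, PySem.Dict.getD_insert_self, h0,
          PySem.Dict.insert_insert_self]
        rw [pvModify_mkInner_views [] t hv]; rfl
      · simp only [pvStepA, hc, h, if_false, Bool.false_eq_true, hv,
          PySem.Dict.modify, PySem.Dict.getD_insert_self, h0,
          PySem.Dict.insert_insert_self]
        rw [pvModify_mkInner_tables [] t (Bool.eq_false_iff.mpr hv)]; rfl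
    have hB : pvStepB (PySem.Dict.mk L) t
        = (PySem.Dict.mk L).insert (pvTblGet t "database") [t] := by
      simp [pvStepB, PySem.Dict.modify,
        PySem.Dict.getD_of_not_contains _ _ (Bool.eq_false_iff.mpr h)]
    rw [hA, hB]
    apply PySem.Dict.ext
    rw [PySem.Dict.items_insert_of_not_contains _ _ (by rw [hc]; exact Bool.eq_false_iff.mpr h),
      PySem.Dict.items_insert_of_not_contains _ _ (Bool.eq_false_iff.mpr h)]
    simp [pvRender]

theorem pvFold_render (ts : List (List (String × String))) :
    ts.foldl pvStepA PySem.Dict.empty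
      = PySem.Dict.mk (((ts.foldl pvStepB PySem.Dict.empty).items).map pvRender) := by
  induction ts using List.reverseRecOn with
  | nil => rfl
  | append_singleton l t ih =>
      rw [List.foldl_append, List.foldl_append, List.foldl_cons, List.foldl_nil,
        List.foldl_cons, List.foldl_nil, ih, pvStepA_render]

-- ===== VERDICT (by name: the statement is the Claim_ definition above) =====
theorem convertTablesToTreeStructure_py_spec : Claim_equal_convertTablesToTreeStructure_py := by
  intro tables _ _
  unfold Spec_convertTablesToTreeStructure_py convertTablesToTreeStructure_py
    convertTablesToTreeStructure_py_alt
  rw [pvFold_render]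
  simp [pvRender, pvMkInner]
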